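-- pv_equiv track=rewrite | github.com/remowxdx/AoC-2020 | aoc20.py | find_image_corners
-- ===== SOURCE A (Python) =====
-- def find_image_corners(image_borders):
--     visited = set()
--     corners = set()
--     for b in image_borders:
--         if b not in visited:
--             visited.add(b)
--         else:
--             corners.add(b)
--     return corners
-- ===== SOURCE B (Python) =====
-- def find_image_corners(image_borders):
--     # Phase 1: build a first-occurrence index table back-to-front, so each
--     # overwrite leaves the FIRST index — no membership test is ever needed.
--     first_index = {b: i for i, b in reversed(list(enumerate(image_borders)))}
--     # Phase 2: stateless filter — keep values not sitting at their first index.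
--     return {b for i, b in enumerate(image_borders) if first_index[b] != i}
-- ===== Notes on version B (the rewrite author's own statement) =====
-- stated objective: alternative
-- what changed: Replaces A's single interleaved pass maintaining a visited set and branching into a corners set with a two-phase tabulate-then-filter: a first-occurrence index table is built back-to-front by pure dict overwrites (no membership test anywhere), then a stateless set comprehension keeps values not sitting at their first index.
import Mathlib
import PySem

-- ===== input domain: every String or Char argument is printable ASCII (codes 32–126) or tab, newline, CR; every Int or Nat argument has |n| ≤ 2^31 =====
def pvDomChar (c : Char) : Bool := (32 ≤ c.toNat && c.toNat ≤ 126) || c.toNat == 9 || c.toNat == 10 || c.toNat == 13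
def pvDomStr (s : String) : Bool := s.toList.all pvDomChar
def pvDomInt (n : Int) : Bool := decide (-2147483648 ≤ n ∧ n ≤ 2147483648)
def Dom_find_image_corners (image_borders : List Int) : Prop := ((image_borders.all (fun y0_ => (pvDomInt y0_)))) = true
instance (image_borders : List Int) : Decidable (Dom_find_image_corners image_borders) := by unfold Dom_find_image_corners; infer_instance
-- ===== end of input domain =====

-- B replaces A's interleaved visited/corners pass with tabulate-then-filter: a first-occurrence
-- index dict built back-to-front by overwrites, then a stateless filter ('alternative', same cost).

-- ===== PORT A =====
def find_image_corners (image_borders : List Int) : List Int :=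
  let res := image_borders.foldl
    (fun (vc : List Int × List Int) b =>
      if PySem.Set.contains vc.1 b = false then (PySem.Set.add vc.1 b, vc.2)
      else (vc.1, PySem.Set.add vc.2 b))
    (PySem.Set.empty, PySem.Set.empty)
  res.2

-- ===== PORT B =====
-- first_index[b] in Source B never raises (every element of the list is a key of first_index),
-- so 'first_index.get? ib.2 != some ib.1' ports 'first_index[b] != i' exactly.
def find_image_corners_alt (image_borders : List Int) : List Int :=
  let first_index := ((PySem.List.enumerate image_borders 0).reverse).foldl
    (fun (d : PySem.Dict Int Int) ib => d.insert ib.2 ib.1) PySem.Dict.empty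
  PySem.Set.ofList
    (((PySem.List.enumerate image_borders 0).filter
        (fun ib => first_index.get? ib.2 != some ib.1)).map (fun ib => ib.2))

-- ===== PRECONDITION & SPEC =====
def Spec_find_image_corners (image_borders : List Int) (out : List Int) : Prop := out = find_image_corners_alt image_borders
instance (image_borders : List Int) (out : List Int) : Decidable (Spec_find_image_corners image_borders out) := by unfold Spec_find_image_corners; infer_instance

-- ===== CLAIM (what is proved, stated in full; the proofs are below) =====
def Claim_equal_find_image_corners : Prop := ∀ (image_borders : List Int), Dom_find_image_corners image_borders → Spec_find_image_corners image_borders (find_image_corners image_borders)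

-- ===== LEMMAS AND PROOFS =====

-- Loop invariant for A: running the fold with visited = set(pre) and accumulated corners c yields
-- c updated with exactly the elements of the suffix that already occur in the prefix before them.
theorem find_image_corners_loop (l : List Int) : ∀ (pre c : List Int),
    (l.foldl
      (fun (vc : List Int × List Int) b =>
        if PySem.Set.contains vc.1 b = false then (PySem.Set.add vc.1 b, vc.2)
        else (vc.1, PySem.Set.add vc.2 b))
      (PySem.Set.ofList pre, c)).2
    = PySem.Set.update c
        (((PySem.List.enumerate l (pre.length : Int)).filter
            (fun ib => (PySem.List.slice (pre ++ l) none (some ib.1)).contains ib.2)).map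
          (fun ib => ib.2)) := by
  induction l with
  | nil => intro pre c; simp [PySem.List.enumerate, PySem.Set.update]
  | cons b t ih =>
    intro pre c
    have hsl : PySem.List.slice (pre ++ b :: t) none (some (pre.length : Int)) = pre := by
      rw [PySem.List.slice_to_natCast]; simp
    have hlen : ((pre.length : Int) + 1) = (((pre ++ [b]).length : Int)) := by simp
    by_cases hb : b ∈ pre
    · have hc : PySem.Set.contains (PySem.Set.ofList pre) b = true := by simp [hb]
      have hofl : PySem.Set.ofList (pre ++ [b]) = PySem.Set.ofList pre := by
        rw [PySem.Set.ofList_eq_foldl, List.foldl_append, ← PySem.Set.ofList_eq_foldl]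
        simp [PySem.Set.add, hb]
      have hih := ih (pre ++ [b]) (PySem.Set.add c b)
      simp only [List.foldl_cons, hc, Bool.true_eq_false, if_false, PySem.List.enumerate_cons]
      rw [show pre ++ b :: t = (pre ++ [b]) ++ t by simp] at hsl ⊢
      simp only [List.filter_cons, hsl]
      rw [show pre.contains b = true by simpa using hb]
      simp only [PySem.Set.update]
      rw [hlen]
      simpa [hofl, PySem.Set.update] using hih
    · have hc : PySem.Set.contains (PySem.Set.ofList pre) b = false := by simp [hb]
      have hofl : PySem.Set.add (PySem.Set.ofList pre) b = PySem.Set.ofList (pre ++ [b]) := by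
        have h2 : PySem.Set.ofList (pre ++ [b])
            = List.foldl PySem.Set.add (PySem.Set.ofList pre) [b] := by
          rw [PySem.Set.ofList_eq_foldl, List.foldl_append, ← PySem.Set.ofList_eq_foldl]
        rw [h2]; rfl
      have hih := ih (pre ++ [b]) c
      simp only [List.foldl_cons, hc, if_pos, PySem.List.enumerate_cons]
      rw [show pre ++ b :: t = (pre ++ [b]) ++ t by simp] at hsl ⊢
      simp only [List.filter_cons, hsl]
      rw [show pre.contains b = false by simpa using hb]
      rw [hlen, hofl]
      simpa using hih

-- B's phase-1 dict characterised: the back-to-front insert fold maps each b ∈ l to its FIRST index.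
theorem first_index_get (l : List Int) : ∀ (s : Int) (d : PySem.Dict Int Int) (b : Int),
    (((PySem.List.enumerate l s).reverse).foldl
        (fun (d : PySem.Dict Int Int) ib => d.insert ib.2 ib.1) d).get? b
    = if b ∈ l then some (s + (l.idxOf b : Int)) else d.get? b := by
  induction l with
  | nil => intro s d b; simp [PySem.List.enumerate]
  | cons x t ih =>
    intro s d b
    rw [PySem.List.enumerate_cons]
    simp only [List.reverse_cons, List.foldl_append, List.foldl_cons, List.foldl_nil]
    by_cases hbx : b = x
    · subst hbx
      rw [PySem.Dict.get?_insert_self]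
      simp [List.idxOf_cons_self]
    · rw [PySem.Dict.get?_insert_of_ne _ _ (by exact hbx)]
      rw [ih (s + 1) d b]
      by_cases hbt : b ∈ t
      · simp only [List.mem_cons, hbt, or_true, if_true]
        rw [List.idxOf_cons_ne _ (by exact fun h => hbx h.symm)]
        push_cast
        ring_nf
      · simp [hbx, hbt]

-- ===== VERDICT (by name: the statement is the Claim_ definition above) =====
theorem find_image_corners_spec : Claim_equal_find_image_corners := by
  intro l _
  unfold Spec_find_image_corners
  simp only [find_image_corners, find_image_corners_alt]
  have hA := find_image_corners_loop l [] []
  simp only [List.nil_append, List.length_nil, Nat.cast_zero, PySem.Set.update_nil_left] at hA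
  have hfilter : List.filter
      (fun ib => (PySem.List.slice l none (some ib.1)).contains ib.2)
      (PySem.List.enumerate l 0)
    = List.filter
      (fun ib => (((PySem.List.enumerate l 0).reverse).foldl
          (fun (d : PySem.Dict Int Int) ib => d.insert ib.2 ib.1) PySem.Dict.empty).get? ib.2
        != some ib.1)
      (PySem.List.enumerate l 0) := by
    apply List.filter_congr
    intro ib hib
    rcases (PySem.List.mem_enumerate_iff _ _ _).1 hib with ⟨k, hk, rfl⟩
    have hmem : l[k] ∈ l := List.getElem_mem hk
    rw [first_index_get l 0 PySem.Dict.empty l[k]]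
    have hidx_lt : l.idxOf l[k] < k + 1 := by
      have hkk : k < (l.take (k+1)).length := by simp; omega
      have hmemtake : l[k] ∈ l.take (k+1) := by
        have := List.getElem_mem hkk
        rwa [List.getElem_take] at this
      exact (List.mem_take_iff_idxOf_lt hmem).1 hmemtake
    have hsl : PySem.List.slice l none (some ((0:Int) + (k:Nat))) = l.take k := by
      rw [show ((0:Int) + ((k:Nat):Int)) = ((k:Nat):Int) by ring, PySem.List.slice_to_natCast]
    rw [hsl]
    by_cases hlt : l.idxOf l[k] < k
    · have hmt : l[k] ∈ l.take k := (List.mem_take_iff_idxOf_lt hmem).2 hlt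
      simp only [hmem, if_true, List.contains_eq_mem, hmt, decide_true]
      symm
      rw [bne_iff_ne]
      intro h
      simp only [Option.some.injEq] at h
      omega
    · have heq : l.idxOf l[k] = k := by omega
      have hmt : l[k] ∉ l.take k := fun h => hlt ((List.mem_take_iff_idxOf_lt hmem).1 h)
      simp [hmt, heq]
  exact hA.trans (by rw [hfilter])
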